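-- pv_equiv track=rewrite | github.com/DavidF2112/Lessons-Python | 01.08.24/task1.py | find_fragments
-- ===== SOURCE A (Python) =====
-- def find_fragments(text):
--     fragments = []
--     length = len(text)
--
--     i = 0
--     while i < length - 2:
--         if text[i].lower() == 'r' and text[i+1] == 'b':
--             j = i + 1
--             while j < length - 1 and text[j] == 'b':
--                 j += 1
--             if j < length and text[j] == 'r':
--                 fragments.append(text[i:j+1])
--                 i = j
--             else:
--                 i += 1
--         else:
--             i += 1
--
--     return fragments
-- ===== SOURCE B (Python) =====
-- def find_fragments(text):
--     # Single left-to-right state machine: s remembers the index of a start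
--     # character (upper or lower) that is so far followed only by the middle
--     # letter; a lowercase terminator both closes a fragment (if at least one
--     # middle letter lies between) and opens a new candidate.
--     res = []
--     s = None
--     for k in range(len(text)):
--         if text[k] == 'r':
--             if s is not None and s + 1 < k:
--                 res.append(text[s:k + 1])
--             s = k
--         elif text[k] == 'R':
--             s = k
--         elif text[k] != 'b':
--             s = None
--     return res
-- ===== Notes on version B (the rewrite author's own statement) =====
-- stated objective: alternative
-- what changed: Replaced A's while-loop with nested run-rescanning and index jumping by a single-pass state machine that keeps only the index of the last viable start character and emits a fragment whenever a lowercase terminator closes it.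
import Mathlib
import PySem

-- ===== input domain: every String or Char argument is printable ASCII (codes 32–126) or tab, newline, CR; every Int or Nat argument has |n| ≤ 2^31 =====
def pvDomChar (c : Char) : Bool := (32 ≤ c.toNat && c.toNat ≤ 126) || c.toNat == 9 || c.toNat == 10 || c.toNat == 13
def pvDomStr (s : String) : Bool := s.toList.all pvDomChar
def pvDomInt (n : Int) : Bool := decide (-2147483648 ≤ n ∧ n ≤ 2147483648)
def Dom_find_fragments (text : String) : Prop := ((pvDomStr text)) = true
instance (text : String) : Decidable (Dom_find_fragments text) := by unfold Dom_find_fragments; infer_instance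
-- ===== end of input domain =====

-- B replaces A's jumping while-loop with nested b-run rescanning by a single-pass state machine (alternative decomposition; same return value, proved equal).


-- ===== PORT A =====
-- A's inner while loop: `while j < length - 1 and text[j] == 'b': j += 1`
-- (j, length are non-negative Python ints, so `j < length - 1` ⟺ `j + 1 < length` exactly)
def runEndA (cs : List Char) (j : Nat) : Nat :=
  if _h : j + 1 < cs.length ∧ cs[j]! = 'b' then runEndA cs (j + 1) else j
termination_by cs.length - j
decreasing_by omega

-- termination helper for goA (A's outer loop always advances i): start ≤ runEndA cs start
theorem runEndA_ge (cs : List Char) (j : Nat) : j ≤ runEndA cs j := by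
  rw [runEndA]
  split
  · exact Nat.le_trans (Nat.le_succ j) (runEndA_ge cs (j + 1))
  · exact Nat.le_refl j
termination_by cs.length - j
decreasing_by rename_i h; omega

-- A's outer while loop; all indexing is guarded in range, so cs[_]! is exact,
-- and the slice text[i:j+1] with 0 ≤ i ≤ j+1 ≤ len is exactly (cs.drop i).take (j+1-i)
def goA (cs : List Char) (i : Nat) (acc : List String) : List String :=
  if _h : i + 2 < cs.length then
    if (cs[i]!).toLower = 'r' ∧ cs[i + 1]! = 'b' then
      if runEndA cs (i + 1) < cs.length ∧ cs[runEndA cs (i + 1)]! = 'r' then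
        goA cs (runEndA cs (i + 1))
          (acc ++ [String.ofList ((cs.drop i).take (runEndA cs (i + 1) + 1 - i))])
      else goA cs (i + 1) acc
    else goA cs (i + 1) acc
  else acc
termination_by cs.length - i
decreasing_by
  · have := runEndA_ge cs (i + 1); omega
  · omega
  · omega

def find_fragments (text : String) : List String := goA text.toList 0 []

-- ===== PORT B =====
-- B's single `for k in range(len(text))` loop with state s (none = Python's None);
-- guarded in-range indexing, slice text[s:k+1] exactly as in port A
def goB (cs : List Char) (k : Nat) (s : Option Nat) (res : List String) : List String :=
  if _h : k < cs.length then
    if cs[k]! = 'r' then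
      goB cs (k + 1) (some k)
        (s.elim res fun p =>
          if p + 1 < k then res ++ [String.ofList ((cs.drop p).take (k + 1 - p))] else res)
    else if cs[k]! = 'R' then goB cs (k + 1) (some k) res
    else if cs[k]! ≠ 'b' then goB cs (k + 1) none res
    else goB cs (k + 1) s res
  else res
termination_by cs.length - k

def find_fragments_alt (text : String) : List String := goB text.toList 0 none []

-- ===== PRECONDITION & SPEC =====
def Spec_find_fragments (text : String) (out : List String) : Prop := out = find_fragments_alt text
instance (text : String) (out : List String) : Decidable (Spec_find_fragments text out) := by unfold Spec_find_fragments; infer_instance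

-- ===== CLAIM (what is proved, stated in full; the proofs are below) =====
def Claim_equal_find_fragments : Prop := ∀ (text : String), Dom_find_fragments text → Spec_find_fragments text (find_fragments text)

-- ===== LEMMAS AND PROOFS =====

-- midpoint spec: the fragment (if any) starting at position p — 'r'/'R', then a
-- maximal nonempty run of 'b', then 'r'
def matchAt (cs : List Char) (p : Nat) : Option String :=
  if p < cs.length then
    if cs[p]! = 'r' ∨ cs[p]! = 'R' then
      if ((cs.drop (p + 1)).takeWhile (· = 'b')) ≠ [] ∧
         ((cs.drop (p + 1)).drop ((cs.drop (p + 1)).takeWhile (· = 'b')).length).head? = some 'r' then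
        some (String.ofList (cs[p]! :: (((cs.drop (p + 1)).takeWhile (· = 'b')) ++ ['r'])))
      else none
    else none
  else none

theorem toLower_eq_r (c : Char) : c.toLower = 'r' ↔ (c = 'r' ∨ c = 'R') := by
  constructor
  · intro he
    by_cases h1 : c = 'r'
    · exact Or.inl h1
    by_cases h2 : c = 'R'
    · exact Or.inr h2
    exfalso
    unfold Char.toLower at he
    split at he
    · rename_i h
      apply h2
      have hv : c.val + ('a'.val - 'A'.val) = 'r'.val := congrArg Char.val he
      rw [show ('a'.val - 'A'.val) = (32 : UInt32) from by decide,
          show ('r'.val) = (114 : UInt32) from by decide] at hv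
      have h90 : c.val.toNat ≤ 90 := by
        have h' := h.2
        rw [UInt32.le_iff_toNat_le] at h'
        simpa using h'
      have hn : c.val.toNat = 82 := by
        have h' := congrArg UInt32.toNat hv
        rw [UInt32.toNat_add, show (114 : UInt32).toNat = 114 from by decide,
            show (32 : UInt32).toNat = 32 from by decide] at h'
        omega
      apply Char.ext
      apply UInt32.toNat_inj.mp
      rw [hn]; decide
    · exact h1 he
  · rintro (rfl | rfl) <;> decide

theorem takeWhile_eq_take_of {α : Type} (p : α → Bool) (l : List α) (m : Nat) (hm : m ≤ l.length)
    (h1 : ∀ k, (hk : k < m) → p (l[k]'(Nat.lt_of_lt_of_le hk hm)) = true)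
    (h2 : ∀ (h : m < l.length), p (l[m]'h) = false) :
    l.takeWhile p = l.take m := by
  induction l generalizing m with
  | nil => simp
  | cons a t ih =>
    cases m with
    | zero =>
      have hpa : p a = false := by have := h2 (by simp); simpa using this
      simp [hpa]
    | succ m =>
      have hpa : p a = true := by have := h1 0 (Nat.succ_pos m); simpa using this
      rw [List.takeWhile_cons, if_pos hpa, List.take_succ_cons]
      congr 1
      exact ih m (by simp at hm; omega)
        (fun k hk => by have := h1 (k + 1) (by omega); simpa using this)
        (fun h => by have := h2 (by simp; omega); simpa using this)

theorem matchAt_eq_none_short (cs : List Char) (p : Nat) (h : cs.length ≤ p + 2) :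
    matchAt cs p = none := by
  unfold matchAt
  split
  · split
    · rw [if_neg]
      rintro ⟨hbs, hhd⟩
      have hlen : (cs.drop (p + 1)).length ≤ 1 := by simp; omega
      have hb1 : 1 ≤ ((cs.drop (p + 1)).takeWhile (· = 'b')).length := by
        cases hh : (cs.drop (p + 1)).takeWhile (· = 'b') with
        | nil => exact absurd hh hbs
        | cons x xs => simp
      have hple : ((cs.drop (p + 1)).takeWhile (· = 'b')).length ≤ (cs.drop (p + 1)).length :=
        (List.takeWhile_prefix _).length_le
      have : (cs.drop (p + 1)).drop ((cs.drop (p + 1)).takeWhile (· = 'b')).length = [] :=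
        List.drop_eq_nil_of_le (by omega)
      rw [this] at hhd
      simp at hhd
    · rfl
  · rfl

theorem matchAt_eq_none_head (cs : List Char) (p : Nat) (h : p < cs.length)
    (h1 : cs[p]! ≠ 'r') (h2 : cs[p]! ≠ 'R') : matchAt cs p = none := by
  unfold matchAt
  rw [if_pos h, if_neg]
  rintro (hc | hc)
  · exact h1 hc
  · exact h2 hc

theorem matchAt_eq_none_nob (cs : List Char) (p : Nat) (h : p + 1 < cs.length)
    (h2 : cs[p + 1]! ≠ 'b') : matchAt cs p = none := by
  unfold matchAt
  split
  · split
    · rw [if_neg]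
      rintro ⟨hbs, -⟩
      apply hbs
      rw [List.drop_eq_getElem_cons h, List.takeWhile_cons, if_neg]
      simp
      rw [← getElem!_pos cs (p + 1) h]
      exact h2
    · rfl
  · rfl

theorem matchAt_eq_some (cs : List Char) (p t : Nat) (h1 : p + 1 < t) (h2 : t < cs.length)
    (hr : cs[p]! = 'r' ∨ cs[p]! = 'R') (hb : ∀ q, p < q → q < t → cs[q]! = 'b')
    (ht : cs[t]! = 'r') :
    matchAt cs p = some (String.ofList ((cs.drop p).take (t + 1 - p))) := by
  have hp : p < cs.length := by omega
  have hmle : t - (p + 1) ≤ (cs.drop (p + 1)).length := by simp; omega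
  have htw : (cs.drop (p + 1)).takeWhile (· = 'b') = (cs.drop (p + 1)).take (t - (p + 1)) := by
    apply takeWhile_eq_take_of _ _ _ hmle
    · intro k hk
      rw [List.getElem_drop]
      simp only [decide_eq_true_eq]
      rw [← getElem!_pos cs (p + 1 + k) (by omega)]
      exact hb (p + 1 + k) (by omega) (by omega)
    · intro hlt
      rw [List.getElem_drop]
      simp only [show p + 1 + (t - (p + 1)) = t from by omega]
      rw [← getElem!_pos cs t h2, ht]
      decide
  have hbslen : ((cs.drop (p + 1)).takeWhile (· = 'b')).length = t - (p + 1) := by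
    rw [htw]; simp; omega
  have hbsne : (cs.drop (p + 1)).takeWhile (· = 'b') ≠ [] := by
    intro h0
    rw [h0] at hbslen
    simp at hbslen
    omega
  have hdrop : (cs.drop (p + 1)).drop ((cs.drop (p + 1)).takeWhile (· = 'b')).length
      = cs.drop t := by
    rw [hbslen, List.drop_drop]
    congr 1
    omega
  have hhd : (cs.drop t).head? = some 'r' := by
    rw [List.head?_drop, List.getElem?_eq_getElem h2, ← getElem!_pos cs t h2, ht]
  unfold matchAt
  rw [if_pos hp, if_pos hr, if_pos ⟨hbsne, by rw [hdrop]; exact hhd⟩]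
  congr 1
  rw [htw, List.drop_eq_getElem_cons hp,
      show t + 1 - p = (t - p) + 1 from by omega, List.take_succ_cons,
      getElem!_pos cs p hp]
  congr 1
  rw [show t - p = (t - (p + 1)) + 1 from by omega, List.take_add_one]
  congr 1
  rw [List.getElem?_eq_getElem (by simp; omega), List.getElem_drop]
  simp only [show p + 1 + (t - (p + 1)) = t from by omega, Option.toList_some]
  rw [← getElem!_pos cs t h2, ht]

theorem matchAt_eq_none_badend (cs : List Char) (p t : Nat) (h1 : p < t) (h2 : t < cs.length)
    (hb : ∀ q, p < q → q < t → cs[q]! = 'b') (ht : cs[t]! ≠ 'b') (ht2 : cs[t]! ≠ 'r') :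
    matchAt cs p = none := by
  by_cases hj1 : t = p + 1
  · exact matchAt_eq_none_nob cs p (by omega) (by rw [← hj1]; exact ht)
  have hmle : t - (p + 1) ≤ (cs.drop (p + 1)).length := by simp; omega
  have htw : (cs.drop (p + 1)).takeWhile (· = 'b') = (cs.drop (p + 1)).take (t - (p + 1)) := by
    apply takeWhile_eq_take_of _ _ _ hmle
    · intro k hk
      rw [List.getElem_drop]
      simp only [decide_eq_true_eq]
      rw [← getElem!_pos cs (p + 1 + k) (by omega)]
      exact hb (p + 1 + k) (by omega) (by omega)
    · intro hlt
      rw [List.getElem_drop]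
      simp only [show p + 1 + (t - (p + 1)) = t from by omega]
      simp only [decide_eq_false_iff_not]
      rw [← getElem!_pos cs t h2]
      exact ht
  have hbslen : ((cs.drop (p + 1)).takeWhile (· = 'b')).length = t - (p + 1) := by
    rw [htw]; simp; omega
  have hdrop : (cs.drop (p + 1)).drop ((cs.drop (p + 1)).takeWhile (· = 'b')).length
      = cs.drop t := by
    rw [hbslen, List.drop_drop]
    congr 1
    omega
  unfold matchAt
  split
  · split
    · rw [if_neg]
      rintro ⟨-, hhd⟩
      rw [hdrop, List.head?_drop, List.getElem?_eq_getElem h2] at hhd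
      apply ht2
      rw [getElem!_pos cs t h2]
      exact Option.some_injective _ hhd
    · rfl
  · rfl

theorem matchAt_eq_none_runoff (cs : List Char) (p : Nat) (hp : p < cs.length)
    (hb : ∀ q, p < q → q < cs.length → cs[q]! = 'b') : matchAt cs p = none := by
  have htw : (cs.drop (p + 1)).takeWhile (· = 'b') = (cs.drop (p + 1)).take (cs.drop (p + 1)).length := by
    apply takeWhile_eq_take_of _ _ _ (Nat.le_refl _)
    · intro k hk
      rw [List.getElem_drop]
      simp only [decide_eq_true_eq]
      rw [← getElem!_pos cs (p + 1 + k) (by simp at hk; omega)]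
      exact hb (p + 1 + k) (by omega) (by simp at hk; omega)
    · intro hlt; omega
  unfold matchAt
  rw [if_pos hp]
  split
  · rw [if_neg]
    rintro ⟨-, hhd⟩
    rw [htw, List.take_length, List.drop_length] at hhd
    simp at hhd
  · rfl

theorem filterMap_range'_peel (f : Nat → Option String) (s n : Nat) :
    (List.range' s (n + 1)).filterMap f = (f s).toList ++ (List.range' (s + 1) n).filterMap f := by
  rw [List.range'_succ]
  cases hf : f s <;> simp [hf]

theorem filterMap_range'_none (f : Nat → Option String) (s n : Nat)
    (h : ∀ q, s ≤ q → q < s + n → f q = none) : (List.range' s n).filterMap f = [] := by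
  rw [List.filterMap_eq_nil_iff]
  intro a ha
  rw [List.mem_range'] at ha
  obtain ⟨kk, hkk, rfl⟩ := ha
  exact h _ (by omega) (by omega)

theorem runEndA_le (cs : List Char) (j : Nat) (h : j + 1 ≤ cs.length) :
    runEndA cs j + 1 ≤ cs.length := by
  rw [runEndA]
  split
  · rename_i hc
    exact runEndA_le cs (j + 1) (by omega)
  · exact h
termination_by cs.length - j
decreasing_by rename_i hc; omega

theorem runEndA_stop (cs : List Char) (j : Nat) :
    ¬(runEndA cs j + 1 < cs.length ∧ cs[runEndA cs j]! = 'b') := by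
  rw [runEndA]
  split
  · rename_i hc
    exact runEndA_stop cs (j + 1)
  · rename_i hc
    exact hc
termination_by cs.length - j
decreasing_by rename_i hc; omega

theorem runEndA_blocks (cs : List Char) (j q : Nat) (h1 : j ≤ q) (h2 : q < runEndA cs j) :
    cs[q]! = 'b' := by
  rw [runEndA] at h2
  split at h2
  · rename_i hc
    rcases Nat.eq_or_lt_of_le h1 with he | hlt
    · rw [← he]; exact hc.2
    · exact runEndA_blocks cs (j + 1) q hlt h2
  · omega
termination_by cs.length - j
decreasing_by rename_i hc; omega

theorem goA_eq (cs : List Char) (i : Nat) (acc : List String) :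
    goA cs i acc = acc ++ (List.range' i (cs.length - i)).filterMap (matchAt cs) := by
  rw [goA]
  split
  · rename_i hlen
    split
    · rename_i hc
      have hge : i + 1 ≤ runEndA cs (i + 1) := runEndA_ge cs (i + 1)
      have hle : runEndA cs (i + 1) + 1 ≤ cs.length := runEndA_le cs (i + 1) (by omega)
      have hbl : ∀ q, i + 1 ≤ q → q < runEndA cs (i + 1) → cs[q]! = 'b' :=
        fun q a b => runEndA_blocks cs (i + 1) q a b
      have hstop := runEndA_stop cs (i + 1)
      set j := runEndA cs (i + 1) with hj
      split
      · rename_i hr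
        have hjne : j ≠ i + 1 := by
          intro e
          rw [e] at hr
          rw [hc.2] at hr
          exact absurd hr.2 (by decide)
        have hji : i + 1 < j := by omega
        have hm : matchAt cs i = some (String.ofList ((cs.drop i).take (j + 1 - i))) :=
          matchAt_eq_some cs i j hji hr.1 ((toLower_eq_r _).mp hc.1)
            (fun q a b => hbl q (by omega) b) hr.2
        rw [goA_eq cs j _]
        have hsplit : (List.range' i (cs.length - i)).filterMap (matchAt cs)
            = String.ofList ((cs.drop i).take (j + 1 - i))
              :: (List.range' j (cs.length - j)).filterMap (matchAt cs) := by
          have e2 : List.range' i ((j - i) + (cs.length - j))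
              = List.range' i (j - i) ++ List.range' (i + (j - i)) (cs.length - j) := by
            simpa using (List.range'_append (s := i) (m := j - i) (n := cs.length - j) (step := 1)).symm
          rw [show cs.length - i = (j - i) + (cs.length - j) from by omega, e2,
              show i + (j - i) = j from by omega, List.filterMap_append,
              show j - i = (j - i - 1) + 1 from by omega, filterMap_range'_peel, hm]
          have hnil : (List.range' (i + 1) (j - i - 1)).filterMap (matchAt cs) = [] := by
            apply filterMap_range'_none
            intro q hq1 hq2
            apply matchAt_eq_none_head cs q (by omega)
            · rw [hbl q (by omega) (by omega)]; decide
            · rw [hbl q (by omega) (by omega)]; decide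
          rw [hnil]
          simp
        rw [hsplit]
        simp
      · rename_i hr
        have hjr : cs[j]! ≠ 'r' := by
          intro hjr'
          exact hr ⟨by omega, hjr'⟩
        have hnm : matchAt cs i = none := by
          by_cases hjb : cs[j]! = 'b'
          · apply matchAt_eq_none_runoff cs i (by omega)
            intro q a b
            have hjlen : j + 1 ≥ cs.length := by
              by_contra hcon
              exact hstop ⟨by omega, hjb⟩
            rcases Nat.lt_or_ge q j with hq | hq
            · exact hbl q (by omega) hq
            · have : q = j := by omega
              rw [this]; exact hjb
          · by_cases hj1 : j = i + 1
            · apply matchAt_eq_none_nob cs i (by omega)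
              rw [← hj1]; exact hjb
            · exact matchAt_eq_none_badend cs i j (by omega) (by omega)
                (fun q a b => hbl q (by omega) b) hjb hjr
        rw [goA_eq cs (i + 1) acc]
        rw [show cs.length - i = (cs.length - (i + 1)) + 1 from by omega,
            filterMap_range'_peel, hnm]
        simp
    · rename_i hc
      have hnm : matchAt cs i = none := by
        by_cases hr' : (cs[i]!).toLower = 'r'
        · have hnb : cs[i + 1]! ≠ 'b' := fun hb => hc ⟨hr', hb⟩
          exact matchAt_eq_none_nob cs i (by omega) hnb
        · apply matchAt_eq_none_head cs i (by omega)
          · intro h; exact hr' ((toLower_eq_r _).mpr (Or.inl h))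
          · intro h; exact hr' ((toLower_eq_r _).mpr (Or.inr h))
      rw [goA_eq cs (i + 1) acc]
      rw [show cs.length - i = (cs.length - (i + 1)) + 1 from by omega,
          filterMap_range'_peel, hnm]
      simp
  · rename_i hlen
    have hnil : (List.range' i (cs.length - i)).filterMap (matchAt cs) = [] := by
      apply filterMap_range'_none
      intro q hq1 hq2
      exact matchAt_eq_none_short cs q (by omega)
    rw [hnil]
    simp
termination_by cs.length - i
decreasing_by
  · have := runEndA_ge cs (i + 1); omega
  · omega
  · omega

-- the fragment still pending in B's state
def pend (cs : List Char) (s : Option Nat) : List String :=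
  s.elim [] fun p => (matchAt cs p).toList

theorem goB_eq (cs : List Char) (k : Nat) (s : Option Nat) (res : List String)
    (hk : k ≤ cs.length)
    (hs : ∀ p, s = some p → p < k ∧ (cs[p]! = 'r' ∨ cs[p]! = 'R')
        ∧ ∀ q, p < q → q < k → cs[q]! = 'b') :
    goB cs k s res = res ++ pend cs s
      ++ (List.range' k (cs.length - k)).filterMap (matchAt cs) := by
  rw [goB.eq_def]
  split
  · rename_i hklen
    have hpeel : (List.range' k (cs.length - k)).filterMap (matchAt cs)
        = (matchAt cs k).toList
          ++ (List.range' (k + 1) (cs.length - (k + 1))).filterMap (matchAt cs) := by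
      rw [show cs.length - k = (cs.length - (k + 1)) + 1 from by omega, filterMap_range'_peel]
    by_cases hr : cs[k]! = 'r'
    · rw [if_pos hr]
      have hres : (s.elim res fun p =>
          if p + 1 < k then res ++ [String.ofList ((cs.drop p).take (k + 1 - p))] else res)
          = res ++ pend cs s := by
        rcases s with _ | p
        · simp [pend]
        · obtain ⟨hpk, hprR, hpb⟩ := hs p rfl
          simp only [Option.elim_some]
          by_cases hp1 : p + 1 < k
          · rw [if_pos hp1]
            simp [pend, matchAt_eq_some cs p k hp1 hklen hprR hpb hr]
          · rw [if_neg hp1]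
            simp [pend, matchAt_eq_none_nob cs p (by omega)
              (by rw [show p + 1 = k from by omega, hr]; decide)]
      rw [goB_eq cs (k + 1) (some k) _ (by omega)
            (by rintro p hp; cases hp; exact ⟨by omega, Or.inl hr, fun q a b => by omega⟩)]
      rw [hres, hpeel]
      simp [pend]
    · rw [if_neg hr]
      by_cases hR : cs[k]! = 'R'
      · rw [if_pos hR]
        have hpnone : pend cs s = [] := by
          rcases s with _ | p
          · simp [pend]
          · obtain ⟨hpk, hprR, hpb⟩ := hs p rfl
            by_cases hp1 : p + 1 = k
            · simp [pend, matchAt_eq_none_nob cs p (by omega) (by rw [hp1, hR]; decide)]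
            · simp [pend, matchAt_eq_none_badend cs p k (by omega) hklen hpb
                (by rw [hR]; decide) (by rw [hR]; decide)]
        rw [goB_eq cs (k + 1) (some k) res (by omega)
              (by rintro p hp; cases hp; exact ⟨by omega, Or.inr hR, fun q a b => by omega⟩)]
        rw [hpnone, hpeel]
        simp [pend]
      · rw [if_neg hR]
        by_cases hB : cs[k]! = 'b'
        · rw [if_neg (not_not_intro hB)]
          rw [goB_eq cs (k + 1) s res (by omega)
                (by intro p hp
                    obtain ⟨hpk, hprR, hpb⟩ := hs p hp
                    refine ⟨by omega, hprR, fun q a b => ?_⟩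
                    rcases Nat.lt_or_ge q k with hq | hq
                    · exact hpb q a hq
                    · rw [show q = k from by omega]; exact hB)]
          rw [hpeel, matchAt_eq_none_head cs k hklen hr hR]
          simp
        · rw [if_pos hB]
          rw [goB_eq cs (k + 1) none res (by omega) (by intro p hp; cases hp)]
          have hpnone : pend cs s = [] := by
            rcases s with _ | p
            · simp [pend]
            · obtain ⟨hpk, hprR, hpb⟩ := hs p rfl
              by_cases hp1 : p + 1 = k
              · simp [pend, matchAt_eq_none_nob cs p (by omega) (by rw [hp1]; exact hB)]
              · simp [pend, matchAt_eq_none_badend cs p k (by omega) hklen hpb hB hr]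
          rw [hpnone, hpeel, matchAt_eq_none_head cs k hklen hr hR]
          simp [pend]
  · rename_i hklen
    have hnil : (List.range' k (cs.length - k)).filterMap (matchAt cs) = [] := by
      apply filterMap_range'_none
      intro q hq1 hq2
      omega
    rw [hnil]
    rcases s with _ | p
    · simp [pend]
    · obtain ⟨hpk, hprR, hpb⟩ := hs p rfl
      simp [pend, matchAt_eq_none_runoff cs p (by omega) (fun q a b => hpb q a (by omega))]
termination_by cs.length - k
decreasing_by all_goals omega

-- ===== VERDICT (by name: the statement is the Claim_ definition above) =====
theorem find_fragments_spec : Claim_equal_find_fragments := by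
  intro text _
  unfold Spec_find_fragments find_fragments find_fragments_alt
  rw [goA_eq, goB_eq _ _ _ _ (Nat.zero_le _) (by intro p hp; cases hp)]
  simp [pend]
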